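-- pv_equiv track=rewrite | github.com/ragnaroik/TIL | baekjoon/silver4/2108_time.py | find_cnt
-- ===== SOURCE A (Python) =====
-- def find_cnt(l):
--     numbers = list(set(l))
--     numbers.sort()
--     cnt_list = {}
--     for number in numbers:
--         cnt_list[number] = l.count(number)
--     max_value = max(cnt_list.values())
--     flag = False
--     answer_onlyone = 0
--     for number in numbers:
--         if cnt_list[number] == max_value and flag == False:
--             flag = True
--             answer_onlyone = number
--         elif cnt_list[number] == max_value and flag == True:
--             answer = number
--             return answer
--             break
--         else:
--             continue
--     return answer_onlyone
-- ===== SOURCE B (Python) =====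
-- def find_cnt(l):
--     s = sorted(l)
--     best = 0
--     first = None
--     second = None
--     i = 0
--     n = len(s)
--     while i < n:
--         j = i
--         while j < n and s[j] == s[i]:
--             j += 1
--         c = j - i
--         if c > best:
--             best, first, second = c, s[i], None
--         elif c == best and second is None:
--             second = s[i]
--         i = j
--     return second if second is not None else first
-- ===== Notes on version B (the rewrite author's own statement) =====
-- stated objective: alternative
-- what changed: A builds sorted(set(l)), a per-key l.count dict and a flag/early-return state machine; B uses no dictionary at all: it sorts the whole list once and does a single run-length scan over the sorted list, maintaining (best run length, first mode, second mode) and resetting the second when a longer run appears.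
-- outside the precondition, e.g. on find_cnt([]): A raises ValueError, B returns None
import Mathlib
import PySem

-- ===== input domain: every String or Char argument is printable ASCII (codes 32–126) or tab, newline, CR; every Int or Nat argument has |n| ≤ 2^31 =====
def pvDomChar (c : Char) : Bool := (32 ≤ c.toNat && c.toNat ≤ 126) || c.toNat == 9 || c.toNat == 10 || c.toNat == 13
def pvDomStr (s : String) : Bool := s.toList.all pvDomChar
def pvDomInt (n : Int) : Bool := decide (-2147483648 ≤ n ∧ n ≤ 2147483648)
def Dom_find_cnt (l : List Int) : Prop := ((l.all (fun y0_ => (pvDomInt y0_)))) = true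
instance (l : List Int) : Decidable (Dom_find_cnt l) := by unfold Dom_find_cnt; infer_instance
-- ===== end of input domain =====

-- B replaces A's sorted(set(l)) + per-key l.count dict + flag/early-return state machine by a
-- dictionary-free run-length scan over sorted(l), tracking (best run length, first mode, second mode).

-- ===== PORT A =====
-- the second loop of A: flag / answer_onlyone state machine with early return
def findCntLoop (cnt : PySem.Dict Int Int) (maxv : Int) :
    List Int → Bool → Int → Int
  | [], _flag, ans => ans
  | n :: rest, flag, ans =>
    if (cnt.getD n 0 == maxv) && (flag == false) then
      findCntLoop cnt maxv rest true n
    else if (cnt.getD n 0 == maxv) && (flag == true) then n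
    else findCntLoop cnt maxv rest flag ans

def find_cnt (l : List Int) : Int :=
  let numbers := PySem.List.sorted (PySem.Set.ofList l) (fun x => x) false
  let cntList := numbers.foldl
    (fun d n => d.insert n ((PySem.List.count l n : Int))) PySem.Dict.empty
  -- max() raises ValueError on an empty sequence; Pre_ excludes l = [], the default is never used
  let maxValue := (PySem.List.max? cntList.values (fun v => v)).getD 0
  findCntLoop cntList maxValue numbers false 0

-- ===== PORT B =====
-- the while loop of B: each step consumes one run s[i..j) of equal values of the sorted list
-- (the inner 'while s[j] == s[i]' is the takeWhile/dropWhile pair) and updates (best, first, second)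
def runScan : List Int → Int → Option Int → Option Int → Option Int × Option Int
  | [], _best, first, second => (first, second)
  | x :: rest, best, first, second =>
    let run := rest.takeWhile (fun y => y == x)
    let t := rest.dropWhile (fun y => y == x)
    let c : Int := (run.length : Int) + 1
    if best < c then runScan t c (some x) none
    else if (c == best) && (second == none) then runScan t best first (some x)
    else runScan t best first second
termination_by s => s.length
decreasing_by
  all_goals
    simpa [Nat.lt_succ_iff] using List.length_dropWhile_le (fun y => y == x) rest

def find_cnt_alt (l : List Int) : Int :=
  let s := PySem.List.sorted l (fun x => x) false
  let fs := runScan s 0 none none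
  -- 'second if second is not None else first'; on l = [] Python B returns None (outside Pre_)
  (if fs.2.isSome then fs.2 else fs.1).getD 0

-- ===== PRECONDITION & SPEC =====
-- Pre_ excludes only the empty list, on which Python A raises ValueError (max of an empty sequence)
def Pre_find_cnt (l : List Int) : Prop := l ≠ []
instance (l : List Int) : Decidable (Pre_find_cnt l) := by unfold Pre_find_cnt; infer_instance
def pvWitness_find_cnt : List Int := [3, 1, 2, 1, 3]

def Spec_find_cnt (l : List Int) (out : Int) : Prop := out = find_cnt_alt l
instance (l : List Int) (out : Int) : Decidable (Spec_find_cnt l out) := by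
  unfold Spec_find_cnt; infer_instance

-- ===== CLAIM (what is proved, stated in full; the proofs are below) =====
def Claim_equal_find_cnt : Prop :=
  ∀ (l : List Int), Dom_find_cnt l → Pre_find_cnt l → Spec_find_cnt l (find_cnt l)

-- ===== LEMMAS AND PROOFS =====

-- once flag is set, A's loop returns the first remaining mode (or the stored answer)
lemma findCntLoop_true (cnt : PySem.Dict Int Int) (mv : Int) (ns : List Int) (a : Int) :
    findCntLoop cnt mv ns true a
      = (ns.filter (fun n => cnt.getD n 0 == mv)).headD a := by
  induction ns generalizing a with
  | nil => simp [findCntLoop]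
  | cons n rest ih =>
    by_cases h : cnt.getD n 0 = mv
    · simp [findCntLoop, h]
    · simp [findCntLoop, h, ih]

-- A's loop from the initial state: second mode if there are at least two, else the first, else 0
lemma findCntLoop_false (cnt : PySem.Dict Int Int) (mv : Int) (ns : List Int) (a : Int) :
    findCntLoop cnt mv ns false a
      = match ns.filter (fun n => cnt.getD n 0 == mv) with
        | [] => a
        | [x] => x
        | _ :: y :: _ => y := by
  induction ns generalizing a with
  | nil => simp [findCntLoop]
  | cons n rest ih =>
    by_cases h : cnt.getD n 0 = mv
    · simp only [findCntLoop, h, beq_self_eq_true, Bool.true_and,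
        List.filter_cons, if_pos]
      rw [findCntLoop_true]
      cases hf : rest.filter (fun n => cnt.getD n 0 == mv) <;> simp
    · have hb : (cnt.getD n 0 == mv) = false := by simp [h]
      have h1 : findCntLoop cnt mv (n :: rest) false a
          = findCntLoop cnt mv rest false a := by
        simp [findCntLoop, hb]
      have h2 : (n :: rest).filter (fun n => cnt.getD n 0 == mv)
          = rest.filter (fun n => cnt.getD n 0 == mv) := by
        simp [hb]
      rw [h1, h2]
      exact ih a

-- ---- B side: runScan over a run decomposition ----

-- one runScan step as a pure state transition on (best, first, second)
def stepB (st : Int × Option Int × Option Int) (p : Int × Nat) : Int × Option Int × Option Int :=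
  if st.1 < (p.2 : Int) then ((p.2 : Int), some p.1, none)
  else if ((p.2 : Int) == st.1) && (st.2.2 == none) then (st.1, st.2.1, some p.1)
  else st

def flatten (rs : List (Int × Nat)) : List Int :=
  rs.flatMap (fun p => List.replicate p.2 p.1)

lemma takeWhile_replicate_append (x : Int) (k : Nat) (t : List Int)
    (h : ∀ y ∈ t, (y == x) = false) :
    (List.replicate k x ++ t).takeWhile (fun y => y == x) = List.replicate k x := by
  induction k with
  | zero =>
    cases t with
    | nil => rfl
    | cons a t' => simp [h a (List.mem_cons_self)]
  | succ k ih => simp [List.replicate_succ, ih]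

lemma dropWhile_replicate_append (x : Int) (k : Nat) (t : List Int)
    (h : ∀ y ∈ t, (y == x) = false) :
    (List.replicate k x ++ t).dropWhile (fun y => y == x) = t := by
  induction k with
  | zero =>
    cases t with
    | nil => rfl
    | cons a t' => simp [h a (List.mem_cons_self)]
  | succ k ih => simp [List.replicate_succ, ih]

-- one whole run of the sorted list is one stepB transition
lemma runScan_run (x : Int) (k : Nat) (t : List Int)
    (h : ∀ y ∈ t, (y == x) = false) (b : Int) (f s : Option Int) :
    runScan (List.replicate (k + 1) x ++ t) b f s =
      runScan t (stepB (b, f, s) (x, k + 1)).1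
        (stepB (b, f, s) (x, k + 1)).2.1 (stepB (b, f, s) (x, k + 1)).2.2 := by
  have hrep : List.replicate (k + 1) x ++ t = x :: (List.replicate k x ++ t) := by
    simp [List.replicate_succ]
  rw [hrep]
  conv_lhs => rw [runScan]
  simp only [takeWhile_replicate_append x k t h, dropWhile_replicate_append x k t h,
    List.length_replicate, stepB]
  push_cast
  split_ifs with h1 h2 <;> simp_all

-- runScan over a strictly-separated run decomposition is the fold of stepB over the runs
lemma runScan_flatten (rs : List (Int × Nat)) (hpos : ∀ p ∈ rs, 1 ≤ p.2)
    (hsep : rs.Pairwise (fun p q => p.1 < q.1)) (b : Int) (f s : Option Int) :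
    runScan (flatten rs) b f s = (rs.foldl stepB (b, f, s)).2 := by
  induction rs generalizing b f s with
  | nil => simp [flatten, runScan]
  | cons p rest ih =>
    obtain ⟨x, c⟩ := p
    have hx : ∀ y ∈ flatten rest, (y == x) = false := by
      intro y hy
      obtain ⟨q, hq, hyq⟩ := List.mem_flatMap.mp hy
      have hyq' : y = q.1 := List.eq_of_mem_replicate hyq
      have hlt : x < q.1 := (List.pairwise_cons.mp hsep).1 q hq
      simp [hyq']; omega
    have hpos' : ∀ p ∈ rest, 1 ≤ p.2 := fun p hp => hpos p (List.mem_cons_of_mem _ hp)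
    obtain ⟨k, rfl⟩ : ∃ k, c = k + 1 := by
      have := hpos (x, c) List.mem_cons_self
      exact ⟨c - 1, by omega⟩
    have hflat : flatten ((x, k + 1) :: rest) = List.replicate (k + 1) x ++ flatten rest := by
      simp [flatten]
    rw [hflat, runScan_run x k _ hx, ih hpos' (List.pairwise_cons.mp hsep).2]
    rfl

-- the fold of stepB computes (max count, first mode, second mode)
lemma foldl_stepB_spec (rs : List (Int × Nat)) (hpos : ∀ p ∈ rs, 1 ≤ p.2) :
    rs.foldl stepB (0, none, none) =
      ((rs.map (fun p => (p.2 : Int))).foldl max 0,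
       ((rs.filter (fun p => (p.2 : Int) == (rs.map (fun p => (p.2 : Int))).foldl max 0)).map
          (·.1)).head?,
       ((rs.filter (fun p => (p.2 : Int) == (rs.map (fun p => (p.2 : Int))).foldl max 0)).map
          (·.1))[1]?) := by
  induction rs using List.reverseRecOn with
  | nil => simp
  | append_singleton rs p ih =>
    obtain ⟨x, c⟩ := p
    have hpos' : ∀ q ∈ rs, 1 ≤ q.2 := fun q hq => hpos q (List.mem_append_left _ hq)
    have hc1 : 1 ≤ c := hpos (x, c) (List.mem_append_right _ List.mem_cons_self)
    set m : Int := (rs.map (fun p => (p.2 : Int))).foldl max 0 with hm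
    have hmax : ((rs ++ [(x, c)]).map (fun p => (p.2 : Int))).foldl max 0 = max m (c : Int) := by
      simp [List.foldl_append, hm]
    have hub : ∀ q ∈ rs, (q.2 : Int) ≤ m :=
      fun q hq => (PySem.List.le_foldl_max (rs.map (fun p => (p.2 : Int))) 0).2 _
        (List.mem_map.mpr ⟨q, hq, rfl⟩)
    have h0m : (0 : Int) ≤ m := (PySem.List.le_foldl_max (rs.map (fun p => (p.2 : Int))) 0).1
    rw [List.foldl_append, ih hpos', hmax]
    rcases lt_trichotomy m (c : Int) with hlt | heq | hgt
    · -- new strictly larger run: it becomes the only mode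
      have hmaxc : max m (c : Int) = (c : Int) := max_eq_right hlt.le
      have hfilt : (rs ++ [(x, c)]).filter (fun p => (p.2 : Int) == max m (c : Int))
          = [(x, c)] := by
        rw [List.filter_append]
        have hnil : rs.filter (fun p => (p.2 : Int) == max m (c : Int)) = [] := by
          apply List.filter_eq_nil_iff.mpr
          intro q hq
          have hq2 := hub q hq
          rw [hmaxc]
          simp only [beq_iff_eq]
          omega
        rw [hnil, hmaxc]
        simp
      rw [hfilt]
      simp [stepB, hlt, hmaxc]
    · -- equal run length: x is appended to the modes
      have hmaxc : max m (c : Int) = m := by omega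
      have hfilt : (rs ++ [(x, c)]).filter (fun p => (p.2 : Int) == max m (c : Int))
          = rs.filter (fun p => (p.2 : Int) == m) ++ [(x, c)] := by
        rw [List.filter_append, hmaxc]
        simp [heq]
      rw [hfilt]
      set M := (rs.filter (fun p => (p.2 : Int) == m)).map (·.1) with hM
      have hMne : M ≠ [] := by
        -- m ≥ c ≥ 1 > 0, so m is attained by some element of rs
        rcases PySem.List.foldl_max_mem (rs.map (fun p => (p.2 : Int))) 0 with h0 | hmem
        · rw [← hm] at h0; omega
        · rw [← hm] at hmem
          obtain ⟨q, hq, hqm⟩ := List.mem_map.mp hmem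
          intro hnil
          have hqin : q ∈ rs.filter (fun p => (p.2 : Int) == m) :=
            List.mem_filter.mpr ⟨hq, by simp [hqm]⟩
          rw [hM, List.map_eq_nil_iff] at hnil
          rw [hnil] at hqin
          cases hqin
      have hstep : ¬ (m < (c : Int)) := by omega
      rw [List.map_append, ← hM]
      cases hMcase : M with
      | nil => exact absurd hMcase hMne
      | cons y M' =>
        cases M' with
        | nil =>
          simp [stepB, heq]
        | cons z M'' =>
          simp [stepB, heq]
    · -- shorter run: nothing changes
      have hmaxc : max m (c : Int) = m := by omega
      have hfilt : (rs ++ [(x, c)]).filter (fun p => (p.2 : Int) == max m (c : Int))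
          = rs.filter (fun p => (p.2 : Int) == m) := by
        rw [List.filter_append, hmaxc]
        have hcne : (((x, c) : Int × Nat).2 : Int) ≠ m := by simp; omega
        simp [hcne]
      rw [hfilt]
      have hstep1 : ¬ (m < (c : Int)) := by omega
      have hstep2 : ((c : Int) == m) = false := by simp; omega
      simp [stepB, hstep1, hstep2, hmaxc]

-- a flatMap of replicates over strictly increasing values is weakly increasing
lemma flatten_pairwise_le (ns : List Int) (f : Int → Nat) (hpw : ns.Pairwise (· < ·)) :
    (ns.flatMap (fun n => List.replicate (f n) n)).Pairwise (· ≤ ·) := by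
  induction ns with
  | nil => simp
  | cons n rest ih =>
    simp only [List.flatMap_cons]
    apply List.pairwise_append.mpr
    refine ⟨List.pairwise_replicate.mpr (Or.inr le_rfl), ih (List.pairwise_cons.mp hpw).2, ?_⟩
    intro a ha b hb
    have ha' : a = n := List.eq_of_mem_replicate ha
    obtain ⟨q, hq, hbq⟩ := List.mem_flatMap.mp hb
    have hb' : b = q := List.eq_of_mem_replicate hbq
    have : n < q := (List.pairwise_cons.mp hpw).1 q hq
    omega

-- counts in a flatMap of replicates over distinct values
lemma count_flatten_replicate (ns : List Int) (hnd : ns.Nodup) (f : Int → Nat) (a : Int) :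
    (ns.flatMap (fun n => List.replicate (f n) n)).count a
      = if a ∈ ns then f a else 0 := by
  induction ns with
  | nil => simp
  | cons n rest ih =>
    have hnd' := (List.nodup_cons.mp hnd).2
    have hnmem := (List.nodup_cons.mp hnd).1
    simp only [List.flatMap_cons, List.count_append, ih hnd']
    by_cases ha : a = n
    · subst ha
      simp [hnmem]
    · simp [List.count_replicate, ha, Ne.symm ha]

-- sorted(l) is the concatenation of the runs (value, multiplicity) over sorted(set(l))
lemma sorted_eq_flatten (l : List Int) :
    PySem.List.sorted l (fun x => x) false
      = flatten ((PySem.List.sorted (PySem.Set.ofList l) (fun x => x) false).map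
          (fun n => (n, l.count n))) := by
  set ns := PySem.List.sorted (PySem.Set.ofList l) (fun x => x) false with hns
  have hpw : ns.Pairwise (· < ·) := PySem.List.sorted_ofList_pairwise_lt (xs := l)
  have hnd : ns.Nodup := hpw.nodup
  have hmem : ∀ a, a ∈ ns ↔ a ∈ l := by
    intro a
    rw [hns, PySem.List.mem_sorted, PySem.Set.mem_ofList]
  have hfl : flatten (ns.map (fun n => (n, l.count n)))
      = ns.flatMap (fun n => List.replicate (l.count n) n) := by
    simp [flatten, List.flatMap_map]
  rw [hfl]
  apply PySem.List.sorted_id_eq_of_perm_of_pairwise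
  · -- permutation, via counts
    apply List.perm_iff_count.mpr
    intro a
    rw [count_flatten_replicate ns hnd _ a]
    by_cases ha : a ∈ ns
    · simp [ha]
    · have : a ∉ l := fun h => ha ((hmem a).mpr h)
      simp [ha, List.count_eq_zero.mpr this]
  · -- sortedness of the concatenated runs
    exact flatten_pairwise_le ns _ hpw

-- the whole equivalence, with every intermediate value of the two ports abstracted
lemma find_cnt_core (l : List Int) :
    find_cnt l = find_cnt_alt l := by
  unfold find_cnt find_cnt_alt
  dsimp only
  set ns := PySem.List.sorted (PySem.Set.ofList l) (fun x => x) false with hns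
  set c : Int → Int := fun n => (PySem.List.count l n : Int) with hcdef
  have hpw : ns.Pairwise (· < ·) := PySem.List.sorted_ofList_pairwise_lt (xs := l)
  have hnsnodup : ns.Nodup := hpw.nodup
  have hmemns : ∀ a, a ∈ ns ↔ a ∈ l := by
    intro a
    rw [hns, PySem.List.mem_sorted, PySem.Set.mem_ofList]
  -- A's dict: items are exactly ns paired with counts
  set cntA := ns.foldl (fun d n => d.insert n (c n)) PySem.Dict.empty with hcntA
  have hitemsA : cntA.items = ns.map (fun n => (n, c n)) := by
    rw [hcntA]
    have := PySem.Dict.items_foldl_insert_fresh (l := ns) (k := fun n => n) (v := c)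
      (d := PySem.Dict.empty) (by intro a _; simp) (by simpa using hnsnodup)
    simpa using this
  have hkeysA : cntA.keys = ns := by
    show cntA.items.map (·.1) = ns
    rw [hitemsA]; simp [Function.comp_def]
  have hkeysAnodup : cntA.keys.Nodup := by rw [hkeysA]; exact hnsnodup
  have hvalsA : cntA.values = ns.map c := by
    show cntA.items.map (·.2) = ns.map c
    rw [hitemsA]; simp [Function.comp_def]
  have hgetA : ∀ n ∈ ns, cntA.getD n 0 = c n := by
    intro n hn
    have hmem : (n, c n) ∈ cntA.items := by
      rw [hitemsA]; exact List.mem_map.mpr ⟨n, hn, rfl⟩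
    exact PySem.Dict.getD_of_mem_items cntA hmem hkeysAnodup 0
  -- the run decomposition of sorted(l)
  set rs : List (Int × Nat) := ns.map (fun n => (n, l.count n)) with hrs
  have hpos : ∀ p ∈ rs, 1 ≤ p.2 := by
    intro p hp
    obtain ⟨n, hn, rfl⟩ := List.mem_map.mp hp
    have hc0 : 0 < l.count n := List.count_pos_iff.mpr ((hmemns n).mp hn)
    simpa using hc0
  have hsep : rs.Pairwise (fun p q => p.1 < q.1) := by
    rw [hrs]
    exact List.pairwise_map.mpr (by simpa using hpw)
  -- B's scan = fold of stepB over the runs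
  have hB : runScan (PySem.List.sorted l (fun x => x) false) 0 none none
      = (rs.foldl stepB (0, none, none)).2 := by
    rw [sorted_eq_flatten l, ← hns, ← hrs]
    exact runScan_flatten rs hpos hsep 0 none none
  -- both maxima agree: A's max? over the counts, B's running max over run lengths
  set m : Int := (rs.map (fun p => (p.2 : Int))).foldl max 0 with hm
  have hmapc : rs.map (fun p => (p.2 : Int)) = ns.map c := by
    rw [hrs, List.map_map]
    apply List.map_congr_left
    intro n _
    simp [hcdef, PySem.List.count_eq]
  have hmA : (PySem.List.max? cntA.values (fun v => v)).getD 0 = m := by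
    rw [hvalsA, hm, hmapc]
    cases hnsc : ns with
    | nil =>
      rw [List.map_nil]
      rw [(PySem.List.max?_eq_none_iff ([] : List Int) (fun v => v)).mpr rfl]
      rfl
    | cons n rest =>
      rw [List.map_cons, PySem.List.max?_id_cons]
      simp only [Option.getD_some, List.foldl_cons]
      have h1 : 1 ≤ c n := by
        have hnl : n ∈ l := (hmemns n).mp (by rw [hnsc]; exact List.mem_cons_self)
        have hc0 : 0 < l.count n := List.count_pos_iff.mpr hnl
        simp only [hcdef, PySem.List.count_eq]; omega
      have hmx : max 0 (c n) = c n := by omega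
      rw [hmx]
  -- the mode lists agree
  have hmodes : (rs.filter (fun p => (p.2 : Int) == m)).map (·.1)
      = ns.filter (fun n => c n == m) := by
    rw [hrs, List.filter_map, List.map_map]
    have : ((fun p : Int × Nat => (p.2 : Int) == m) ∘ fun n => (n, l.count n))
        = fun n => c n == m := by
      funext n
      simp [hcdef, PySem.List.count_eq]
    rw [this]
    simp [Function.comp_def]
  -- A's loop tests via dict lookups = tests via counts
  have hfc : ns.filter (fun n => cntA.getD n 0 == m) = ns.filter (fun n => c n == m) :=
    List.filter_congr (by intro x hx; rw [hgetA x hx])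
  rw [hmA, findCntLoop_false, hfc, hB, foldl_stepB_spec rs hpos, ← hm, hmodes]
  cases hF : ns.filter (fun n => c n == m) with
  | nil => simp
  | cons x t =>
    cases t with
    | nil => simp
    | cons y t' => simp

-- ===== VERDICT (by name: the statement is the Claim_ definition above) =====
theorem find_cnt_spec : Claim_equal_find_cnt := by
  intro l _hdom _hpre
  unfold Spec_find_cnt
  exact find_cnt_core l
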